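-- pv_equiv track=rewrite | github.com/Seungsu-Lee19/baekjoon-python | 백준/Gold/9205. 맥주 마시면서 걸어가기/맥주 마시면서 걸어가기.py | bfs
-- ===== SOURCE A (Python) =====
-- from collections import deque
--
-- def bfs(start, end, conv):
--     queue = deque()
--     queue.append(start)
--
--     visited = [False] * len(conv)
--     while queue:
--         x, y = queue.popleft()
--
--         if abs(x - end[0]) + abs(y - end[1]) <= 1000:
--             return "happy"
--
--         for i in range(len(conv)):
--             if visited[i] == False:
--                 if abs(x - conv[i][0]) + abs(y - conv[i][1]) <= 1000:
--                     queue.append((conv[i][0], conv[i][1]))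
--                     visited[i] = True
--     return "sad"
-- ===== SOURCE B (Python) =====
-- def bfs(start, end, conv):
--     reached = [start]
--     remaining = list(conv)
--     while True:
--         still = []
--         for p in remaining:
--             if any(abs(p[0] - q[0]) + abs(p[1] - q[1]) <= 1000 for q in reached):
--                 reached.append(p)
--             else:
--                 still.append(p)
--         if len(still) == len(remaining):
--             break
--         remaining = still
--     return "happy" if any(abs(end[0] - q[0]) + abs(end[1] - q[1]) <= 1000 for q in reached) else "sad"
-- ===== Notes on version B (the rewrite author's own statement) =====
-- stated objective: alternative
-- what changed: Replaces the FIFO-queue + visited-index-array BFS with round-based fixpoint saturation: repeatedly sweep the remaining stores, absorbing each store within Manhattan distance 1000 of an already-reached point, until a sweep absorbs nothing, then test the end point against the reached set.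
import Mathlib
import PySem

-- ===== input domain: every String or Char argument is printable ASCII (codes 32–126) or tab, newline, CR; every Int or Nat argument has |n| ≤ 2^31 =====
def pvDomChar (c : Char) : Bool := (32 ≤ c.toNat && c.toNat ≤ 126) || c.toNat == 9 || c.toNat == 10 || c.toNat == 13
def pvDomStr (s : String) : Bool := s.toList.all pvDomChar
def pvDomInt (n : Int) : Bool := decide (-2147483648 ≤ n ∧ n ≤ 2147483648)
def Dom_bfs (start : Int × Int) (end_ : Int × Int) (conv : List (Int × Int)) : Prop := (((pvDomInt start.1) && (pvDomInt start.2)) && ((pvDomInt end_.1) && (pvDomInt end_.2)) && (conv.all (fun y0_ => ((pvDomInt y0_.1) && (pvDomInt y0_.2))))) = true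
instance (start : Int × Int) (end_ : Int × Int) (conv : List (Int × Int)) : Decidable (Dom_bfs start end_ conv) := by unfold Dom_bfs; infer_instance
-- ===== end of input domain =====

-- B replaces A's FIFO-queue + visited-array BFS with round-based fixpoint saturation
-- over the store list (alternative decomposition; no speed claim); same return value.


-- ===== PORT A =====
-- the inner `for i in range(len(conv))` loop: walks conv and visited in step,
-- returning (newly enqueued points, updated visited list)
def scanA (x y : Int) : List (Int × Int) → List Bool → List (Int × Int) × List Bool
  | [], _ => ([], [])
  | _ :: _, [] => ([], [])
  | c :: cs, v :: vs =>
    let r := scanA x y cs vs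
    if v = false then
      if |x - c.1| + |y - c.2| ≤ 1000 then ((c.1, c.2) :: r.1, true :: r.2)
      else (r.1, v :: r.2)
    else (r.1, v :: r.2)

theorem scanA_measure (x y : Int) (conv : List (Int × Int)) (vis : List Bool) :
    (scanA x y conv vis).1.length + (scanA x y conv vis).2.count false ≤ vis.count false := by
  induction conv generalizing vis with
  | nil => simp [scanA]
  | cons c cs ih =>
    cases vis with
    | nil => simp [scanA]
    | cons v vs =>
      have h := ih vs
      simp only [scanA]
      split_ifs with h1 h2 <;>
        simp only [List.length_cons, List.count_cons, beq_iff_eq] <;>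
        simp [h1] <;> omega

def loopA (end_ : Int × Int) (conv : List (Int × Int)) : List (Int × Int) → List Bool → String
  | [], _ => "sad"
  | (x, y) :: rest, vis =>
    if |x - end_.1| + |y - end_.2| ≤ 1000 then "happy"
    else
      let r := scanA x y conv vis
      loopA end_ conv (rest ++ r.1) r.2
  termination_by queue vis => queue.length + 2 * vis.count false
  decreasing_by
    have h := scanA_measure x y conv vis
    simp only [List.length_append, List.length_cons]
    omega

def bfs (start : Int × Int) (end_ : Int × Int) (conv : List (Int × Int)) : String :=
  loopA end_ conv [start] (List.replicate conv.length false)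

-- ===== PORT B =====
def pvAnyClose (p : Int × Int) (reached : List (Int × Int)) : Bool :=
  reached.any (fun q => decide (|p.1 - q.1| + |p.2 - q.2| ≤ (1000 : Int)))

def passB : List (Int × Int) → List (Int × Int) → List (Int × Int) × List (Int × Int)
  | reached, [] => (reached, [])
  | reached, p :: ps =>
    if pvAnyClose p reached then passB (reached ++ [p]) ps
    else
      let r := passB reached ps
      (r.1, p :: r.2)

theorem passB_still_le (reached rem : List (Int × Int)) :
    (passB reached rem).2.length ≤ rem.length := by
  induction rem generalizing reached with
  | nil => simp [passB]
  | cons p ps ih =>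
    simp only [passB]
    split_ifs with h
    · exact Nat.le_trans (ih _) (Nat.le_succ _)
    · simpa using ih reached

def loopB (reached remaining : List (Int × Int)) : List (Int × Int) :=
  if (passB reached remaining).2.length = remaining.length then (passB reached remaining).1
  else loopB (passB reached remaining).1 (passB reached remaining).2
  termination_by remaining.length
  decreasing_by
    have h2 := passB_still_le reached remaining
    omega

def bfs_alt (start : Int × Int) (end_ : Int × Int) (conv : List (Int × Int)) : String :=
  if (loopB [start] conv).any (fun q => decide (|end_.1 - q.1| + |end_.2 - q.2| ≤ (1000 : Int))) then "happy"
  else "sad"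

-- ===== PRECONDITION & SPEC =====
def Spec_bfs (start : Int × Int) (end_ : Int × Int) (conv : List (Int × Int)) (out : String) : Prop := out = bfs_alt start end_ conv
instance (start : Int × Int) (end_ : Int × Int) (conv : List (Int × Int)) (out : String) : Decidable (Spec_bfs start end_ conv out) := by unfold Spec_bfs; infer_instance

-- ===== CLAIM (what is proved, stated in full; the proofs are below) =====
def Claim_equal_bfs : Prop := ∀ (start : Int × Int) (end_ : Int × Int) (conv : List (Int × Int)), Dom_bfs start end_ conv → Spec_bfs start end_ conv (bfs start end_ conv)

-- ===== LEMMAS AND PROOFS =====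

-- closure of source points `srcs` through stores `stores` by hops of Manhattan
-- distance ≤ 1000: the reachability semantics both programs compute
inductive CL (srcs stores : List (Int × Int)) : (Int × Int) → Prop
  | base {p} : p ∈ srcs → CL srcs stores p
  | step {p q} : CL srcs stores p → q ∈ stores → |p.1 - q.1| + |p.2 - q.2| ≤ 1000 → CL srcs stores q

theorem CL_mono {s1 S1 s2 S2 : List (Int × Int)} {p : Int × Int}
    (hs : ∀ x ∈ s1, CL s2 S2 x) (hS : ∀ x ∈ S1, x ∈ S2) : CL s1 S1 p → CL s2 S2 p := by
  intro h
  induction h with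
  | base hp => exact hs _ hp
  | step _ hq hd ih => exact CL.step ih (hS _ hq) hd

theorem CL_nil {S : List (Int × Int)} {p : Int × Int} : ¬ CL [] S p := by
  intro h
  induction h with
  | base hp => simp at hp
  | step _ _ _ ih => exact ih

def availL : List (Int × Int) → List Bool → List (Int × Int)
  | [], _ => []
  | _ :: _, [] => []
  | c :: cs, v :: vs => if v then availL cs vs else c :: availL cs vs

theorem availL_replicate (conv : List (Int × Int)) :
    availL conv (List.replicate conv.length false) = conv := by
  induction conv with
  | nil => rfl
  | cons c cs ih =>
    simp only [List.length_cons, List.replicate_succ, availL, if_neg Bool.false_ne_true]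
    rw [ih]

theorem scanA_fst (x y : Int) (conv : List (Int × Int)) (vis : List Bool) :
    (scanA x y conv vis).1 = (availL conv vis).filter (fun q => decide (|x - q.1| + |y - q.2| ≤ 1000)) := by
  induction conv generalizing vis with
  | nil => simp [scanA, availL]
  | cons c cs ih =>
    cases vis with
    | nil => simp [scanA, availL]
    | cons v vs =>
      simp only [scanA, availL]
      split_ifs with h1 h2 <;> simp_all

theorem scanA_avail (x y : Int) (conv : List (Int × Int)) (vis : List Bool) :
    availL conv (scanA x y conv vis).2 = (availL conv vis).filter (fun q => ! decide (|x - q.1| + |y - q.2| ≤ 1000)) := by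
  induction conv generalizing vis with
  | nil => simp [availL]
  | cons c cs ih =>
    cases vis with
    | nil => simp [scanA, availL]
    | cons v vs =>
      simp only [scanA, availL]
      split_ifs with h1 h2 <;> simp_all [availL]

theorem CL_cons_step (x y : Int) (rest S : List (Int × Int)) {p : Int × Int}
    (h : CL ((x, y) :: rest) S p) :
    p = (x, y) ∨ CL (rest ++ S.filter (fun q => decide (|x - q.1| + |y - q.2| ≤ 1000)))
        (S.filter (fun q => ! decide (|x - q.1| + |y - q.2| ≤ 1000))) p := by
  induction h with
  | base hp =>
    rcases List.mem_cons.1 hp with h | h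
    · exact Or.inl h
    · exact Or.inr (CL.base (List.mem_append_left _ h))
  | @step p' q hp' hq hd ih =>
    right
    by_cases hc : |x - q.1| + |y - q.2| ≤ 1000
    · exact CL.base (List.mem_append_right _ (List.mem_filter.2 ⟨hq, by simpa using hc⟩))
    · rcases ih with rfl | ih'
      · exact absurd hd hc
      · exact CL.step ih' (List.mem_filter.2 ⟨hq, by simpa using hc⟩) hd

theorem CL_cons_step_rev (x y : Int) (rest S : List (Int × Int)) {p : Int × Int}
    (h : CL (rest ++ S.filter (fun q => decide (|x - q.1| + |y - q.2| ≤ 1000)))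
        (S.filter (fun q => ! decide (|x - q.1| + |y - q.2| ≤ 1000))) p) :
    CL ((x, y) :: rest) S p := by
  refine CL_mono ?_ ?_ h
  · intro z hz
    rcases List.mem_append.1 hz with h1 | h1
    · exact CL.base (List.mem_cons_of_mem _ h1)
    · rcases List.mem_filter.1 h1 with ⟨h2, h3⟩
      exact CL.step (CL.base List.mem_cons_self) h2 (by simpa using h3)
  · intro z hz; exact (List.mem_filter.1 hz).1

theorem loopA_happy (end_ : Int × Int) (conv : List (Int × Int)) (queue : List (Int × Int)) (vis : List Bool) :
    loopA end_ conv queue vis = "happy" ↔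
      ∃ p, CL queue (availL conv vis) p ∧ |p.1 - end_.1| + |p.2 - end_.2| ≤ 1000 := by
  induction queue, vis using loopA.induct end_ conv with
  | case1 vis =>
    constructor
    · intro h; simp [loopA] at h
    · rintro ⟨p, hp, -⟩; exact absurd hp CL_nil
  | case2 x y rest vis hc =>
    have hh : loopA end_ conv ((x, y) :: rest) vis = "happy" := by
      simp [loopA, hc]
    rw [hh]
    exact iff_of_true rfl ⟨(x, y), CL.base List.mem_cons_self, hc⟩
  | case3 x y rest vis hc r ih =>
    have hh : loopA end_ conv ((x, y) :: rest) vis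
        = loopA end_ conv (rest ++ (scanA x y conv vis).1) (scanA x y conv vis).2 := by
      simp [loopA, hc]
    rw [hh, ih, scanA_fst, scanA_avail]
    constructor
    · rintro ⟨p, hp, hpe⟩
      exact ⟨p, CL_cons_step_rev x y rest _ hp, hpe⟩
    · rintro ⟨p, hp, hpe⟩
      rcases CL_cons_step x y rest _ hp with rfl | hp'
      · exact absurd hpe hc
      · exact ⟨p, hp', hpe⟩

theorem passB_reached_subset (reached rem : List (Int × Int)) :
    ∀ x ∈ reached, x ∈ (passB reached rem).1 := by
  induction rem generalizing reached with
  | nil => intro x hx; simpa [passB] using hx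
  | cons p ps ih =>
    intro x hx
    simp only [passB]
    split_ifs with h
    · exact ih _ x (List.mem_append_left _ hx)
    · exact ih _ x hx

theorem passB_fst_CL {R0 S0 : List (Int × Int)} (reached rem : List (Int × Int))
    (hR : ∀ x ∈ reached, CL R0 S0 x) (hS : ∀ x ∈ rem, x ∈ S0) :
    ∀ p ∈ (passB reached rem).1, CL R0 S0 p := by
  induction rem generalizing reached with
  | nil => intro p hp; exact hR p (by simpa [passB] using hp)
  | cons p ps ih =>
    intro z hz
    simp only [passB] at hz
    split_ifs at hz with h
    · rcases (show ∃ a b, (a, b) ∈ reached ∧ |p.1 - a| + |p.2 - b| ≤ 1000 by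
        simpa [pvAnyClose] using h) with ⟨a, b, hq, hd⟩
      refine ih _ ?_ (fun w hw => hS w (List.mem_cons_of_mem _ hw)) z hz
      intro w hw
      rcases List.mem_append.1 hw with hw | hw
      · exact hR w hw
      · have : w = p := by simpa using hw
        subst this
        refine CL.step (hR _ hq) (hS _ List.mem_cons_self) ?_
        have hd' : |a - w.1| + |b - w.2| ≤ 1000 := by
          rw [abs_sub_comm a, abs_sub_comm b]; exact hd
        simpa using hd'
    · exact ih reached hR (fun w hw => hS w (List.mem_cons_of_mem _ hw)) z hz

theorem passB_still_subset (reached rem : List (Int × Int)) :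
    ∀ x ∈ (passB reached rem).2, x ∈ rem := by
  induction rem generalizing reached with
  | nil => intro x hx; simp [passB] at hx
  | cons p ps ih =>
    intro x hx
    simp only [passB] at hx
    split_ifs at hx with h
    · exact List.mem_cons_of_mem _ (ih _ x hx)
    · simp only [List.mem_cons] at hx
      rcases hx with rfl | hx
      · exact List.mem_cons_self
      · exact List.mem_cons_of_mem _ (ih reached x hx)

theorem passB_cover (reached rem : List (Int × Int)) :
    ∀ q ∈ rem, q ∈ (passB reached rem).1 ∨ q ∈ (passB reached rem).2 := by
  induction rem generalizing reached with
  | nil => intro q hq; simp at hq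
  | cons p ps ih =>
    intro q hq
    simp only [passB]
    split_ifs with h
    · rcases List.mem_cons.1 hq with rfl | hq'
      · exact Or.inl (passB_reached_subset _ ps q (List.mem_append_right _ List.mem_cons_self))
      · exact ih _ q hq'
    · rcases List.mem_cons.1 hq with rfl | hq'
      · exact Or.inr List.mem_cons_self
      · rcases ih reached q hq' with h1 | h1
        · exact Or.inl h1
        · exact Or.inr (List.mem_cons_of_mem _ h1)

theorem passB_fix (reached rem : List (Int × Int))
    (h : (passB reached rem).2.length = rem.length) :
    (passB reached rem).1 = reached ∧ ∀ p ∈ rem, pvAnyClose p reached = false := by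
  induction rem generalizing reached with
  | nil => exact ⟨rfl, by simp⟩
  | cons p ps ih =>
    simp only [passB] at h ⊢
    split_ifs at h ⊢ with hc
    · exfalso
      have := passB_still_le (reached ++ [p]) ps
      simp only [List.length_cons] at h
      omega
    · have h' : (passB reached ps).2.length = ps.length := by
        simpa using h
      rcases ih reached h' with ⟨h1, h2⟩
      refine ⟨h1, ?_⟩
      intro z hz
      rcases List.mem_cons.1 hz with rfl | hz'
      · simpa using hc
      · exact h2 z hz'

theorem CL_fix {reached rem : List (Int × Int)} {p : Int × Int}
    (h : ∀ q ∈ rem, pvAnyClose q reached = false) (hp : CL reached rem p) : p ∈ reached := by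
  induction hp with
  | base hx => exact hx
  | @step p' q hp' hq hd ih =>
    exfalso
    have := h q hq
    simp only [pvAnyClose, List.any_eq_false] at this
    have h2 := this p' ih
    rw [abs_sub_comm (q.1) _, abs_sub_comm (q.2) _] at h2
    simp at h2
    omega

theorem CL_pass_iff (reached rem : List (Int × Int)) (p : Int × Int) :
    CL reached rem p ↔ CL (passB reached rem).1 (passB reached rem).2 p := by
  constructor
  · intro h
    induction h with
    | base hx => exact CL.base (passB_reached_subset _ _ _ hx)
    | @step p' q hp' hq hd ih =>
      rcases passB_cover reached rem q hq with h1 | h1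
      · exact CL.base h1
      · exact CL.step ih h1 hd
  · exact CL_mono (passB_fst_CL reached rem (fun x hx => CL.base hx) (fun x hx => hx))
      (passB_still_subset reached rem)

theorem loopB_mem (reached rem : List (Int × Int)) (p : Int × Int) :
    p ∈ loopB reached rem ↔ CL reached rem p := by
  induction reached, rem using loopB.induct with
  | case1 reached rem h =>
    rcases passB_fix reached rem h with ⟨h1, h2⟩
    rw [loopB, if_pos h, h1]
    constructor
    · exact fun hx => CL.base hx
    · exact CL_fix h2
  | case2 reached rem h ih =>
    rw [loopB, if_neg h]
    rw [ih, ← CL_pass_iff]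

theorem loopA_cases (end_ : Int × Int) (conv : List (Int × Int)) (queue : List (Int × Int)) (vis : List Bool) :
    loopA end_ conv queue vis = "happy" ∨ loopA end_ conv queue vis = "sad" := by
  induction queue, vis using loopA.induct end_ conv with
  | case1 vis => right; simp [loopA]
  | case2 x y rest vis hc => left; simp [loopA, hc]
  | case3 x y rest vis hc r ih =>
    have hh : loopA end_ conv ((x, y) :: rest) vis
        = loopA end_ conv (rest ++ (scanA x y conv vis).1) (scanA x y conv vis).2 := by
      simp [loopA, hc]
    rw [hh]; exact ih

theorem bfs_alt_happy (start end_ : Int × Int) (conv : List (Int × Int)) :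
    bfs_alt start end_ conv = "happy" ↔
      ∃ p, CL [start] conv p ∧ |p.1 - end_.1| + |p.2 - end_.2| ≤ 1000 := by
  unfold bfs_alt
  constructor
  · intro h
    split_ifs at h with hany
    · rcases List.any_eq_true.mp hany with ⟨q, hq, hd⟩
      refine ⟨q, (loopB_mem _ _ _).1 hq, ?_⟩
      have hd' : |end_.1 - q.1| + |end_.2 - q.2| ≤ 1000 := by simpa using hd
      rw [abs_sub_comm end_.1, abs_sub_comm end_.2] at hd'
      exact hd'
    · simp at h
  · rintro ⟨p, hp, hpe⟩
    have hany : (loopB [start] conv).any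
        (fun q => decide (|end_.1 - q.1| + |end_.2 - q.2| ≤ (1000 : Int))) = true := by
      refine List.any_eq_true.mpr ⟨p, (loopB_mem _ _ _).2 hp, ?_⟩
      rw [abs_sub_comm end_.1, abs_sub_comm end_.2]
      simpa using hpe
    simp [hany]

theorem bfs_eq (start end_ : Int × Int) (conv : List (Int × Int)) :
    bfs start end_ conv = bfs_alt start end_ conv := by
  have hA : bfs start end_ conv = "happy" ↔
      ∃ p, CL [start] conv p ∧ |p.1 - end_.1| + |p.2 - end_.2| ≤ 1000 := by
    unfold bfs
    rw [loopA_happy, availL_replicate]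
  rcases loopA_cases end_ conv [start] (List.replicate conv.length false) with h | h
  · have h' : bfs start end_ conv = "happy" := h
    rw [h', ((bfs_alt_happy start end_ conv).2 (hA.1 h')).symm]
  · have h' : bfs start end_ conv = "sad" := h
    have hne : ¬ bfs start end_ conv = "happy" := by rw [h']; decide
    have : ¬ bfs_alt start end_ conv = "happy" := fun hc =>
      hne (hA.2 ((bfs_alt_happy start end_ conv).1 hc))
    have hsad : bfs_alt start end_ conv = "sad" := by
      unfold bfs_alt at this ⊢
      split_ifs at this ⊢ with hany
      · exact absurd rfl this
      · rfl
    rw [h', hsad]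

-- ===== VERDICT (by name: the statement is the Claim_ definition above) =====
theorem bfs_spec : Claim_equal_bfs := by
  intro start end_ conv _
  exact bfs_eq start end_ conv
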